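-- pv_equiv track=rewrite | github.com/Djanghao/masterclass | src/actions/py/build.py | diff_files
-- ===== SOURCE A (Python) =====
-- def diff_files(old_hashes: dict, new_hashes: dict) -> dict:
--     """Compare old and new file hashes. Returns categorized file lists."""
--     old_paths = set(old_hashes.keys())
--     new_paths = set(new_hashes.keys())
--
--     added = new_paths - old_paths
--     removed = old_paths - new_paths
--     common = new_paths & old_paths
--     changed = {f for f in common if new_hashes[f] != old_hashes[f].get("hash", "")}
--     unchanged = common - changed
--
--     return {
--         "added": sorted(added),
--         "removed": sorted(removed),
--         "changed": sorted(changed),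
--         "unchanged": sorted(unchanged),
--     }
-- ===== SOURCE B (Python) =====
-- def diff_files(old_hashes: dict, new_hashes: dict) -> dict:
--     """Compare old and new file hashes. Returns categorized file lists."""
--     old_keys = sorted(old_hashes)
--     new_keys = sorted(new_hashes)
--     added, removed, changed, unchanged = [], [], [], []
--     i, j = 0, 0
--     # two-pointer merge of the two sorted key lists: every bucket is produced
--     # already sorted, so no per-bucket sorting or set algebra is needed
--     while i < len(old_keys) and j < len(new_keys):
--         o, n = old_keys[i], new_keys[j]
--         if o == n:
--             if new_hashes[n] != old_hashes[o].get("hash", ""):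
--                 changed.append(n)
--             else:
--                 unchanged.append(n)
--             i += 1
--             j += 1
--         elif o < n:
--             removed.append(o)
--             i += 1
--         else:
--             added.append(n)
--             j += 1
--     removed.extend(old_keys[i:])
--     added.extend(new_keys[j:])
--     return {
--         "added": added,
--         "removed": removed,
--         "changed": changed,
--         "unchanged": unchanged,
--     }
-- ===== Notes on version B (the rewrite author's own statement) =====
-- stated objective: alternative
-- what changed: Replaces A's set-algebra (difference/intersection/comprehension) followed by four sorted() calls with a sort-then-merge algorithm: sort the two key lists once and classify every path in a single two-pointer merge, so each bucket is emitted already in sorted order and no set operations or per-bucket sorts remain.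
import Mathlib
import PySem

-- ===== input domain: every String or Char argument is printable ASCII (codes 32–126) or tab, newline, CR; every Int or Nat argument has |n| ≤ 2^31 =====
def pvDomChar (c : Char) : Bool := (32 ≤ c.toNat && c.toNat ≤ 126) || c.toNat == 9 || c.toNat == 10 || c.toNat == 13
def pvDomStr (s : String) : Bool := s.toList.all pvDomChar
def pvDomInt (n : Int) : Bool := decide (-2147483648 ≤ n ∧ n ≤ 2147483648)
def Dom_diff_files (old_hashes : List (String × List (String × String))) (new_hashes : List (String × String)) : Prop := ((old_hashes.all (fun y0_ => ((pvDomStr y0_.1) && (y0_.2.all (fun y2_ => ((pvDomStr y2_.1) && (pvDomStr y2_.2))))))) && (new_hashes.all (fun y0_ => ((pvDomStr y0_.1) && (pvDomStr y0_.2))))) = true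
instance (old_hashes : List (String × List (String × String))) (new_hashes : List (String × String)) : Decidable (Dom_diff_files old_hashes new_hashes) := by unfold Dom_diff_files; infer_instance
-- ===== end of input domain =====

-- B replaces A's set algebra plus four sorted() calls by sorting the two key lists once and
-- classifying every path in a single two-pointer merge, each bucket emitted already sorted.

-- ===== PORT A =====
-- old_hashes[f].get("hash", "") : f is guaranteed present where this is evaluated, so getD [] is exact.
def diff_files (old_hashes : List (String × List (String × String))) (new_hashes : List (String × String)) : List (String × List String) :=
  let oldD := PySem.Dict.mk old_hashes
  let newD := PySem.Dict.mk new_hashes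
  let old_paths := PySem.Set.ofList oldD.keys
  let new_paths := PySem.Set.ofList newD.keys
  let added := PySem.Set.diff new_paths old_paths
  let removed := PySem.Set.diff old_paths new_paths
  let common := PySem.Set.inter new_paths old_paths
  -- set comprehension over the set 'common': exact, since the result is only sorted afterwards
  let changed := PySem.Set.ofList (common.filter (fun f =>
    ((newD.get? f).getD "") != PySem.Dict.getD (PySem.Dict.mk ((oldD.get? f).getD [])) "hash" ""))
  let unchanged := PySem.Set.diff common changed
  [("added", PySem.List.sorted added (fun x => x) false),
   ("removed", PySem.List.sorted removed (fun x => x) false),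
   ("changed", PySem.List.sorted changed (fun x => x) false),
   ("unchanged", PySem.List.sorted unchanged (fun x => x) false)]

-- ===== PORT B =====
-- the while loop: two pointers over the two sorted key lists, transcribed as recursion
-- consuming the suffixes old_keys[i:], new_keys[j:] with the four buckets as accumulators;
-- the [], _ / _, [] cases are the two trailing .extend(...) calls.
def bMerge (pred : String → Bool) : List String → List String →
    List String → List String → List String → List String →
    List String × List String × List String × List String
  | [], nk, a, r, c, u => (a ++ nk, r, c, u)
  | o :: ot, [], a, r, c, u => (a, r ++ (o :: ot), c, u)
  | o :: ot, n :: nt, a, r, c, u =>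
    if o = n then
      if pred n then bMerge pred ot nt a r (c ++ [n]) u
      else bMerge pred ot nt a r c (u ++ [n])
    else if o < n then bMerge pred ot (n :: nt) a (r ++ [o]) c u
    else bMerge pred (o :: ot) nt (a ++ [n]) r c u
termination_by ok nk _ _ _ _ => ok.length + nk.length
decreasing_by all_goals simp <;> omega

-- new_hashes[n] != old_hashes[o].get("hash","")  (o = n there; both keys present, so getD is exact)
def bPred (oldD : PySem.Dict String (List (String × String))) (newD : PySem.Dict String String) (f : String) : Bool :=
  ((newD.get? f).getD "") != PySem.Dict.getD (PySem.Dict.mk ((oldD.get? f).getD [])) "hash" ""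

def diff_files_alt (old_hashes : List (String × List (String × String))) (new_hashes : List (String × String)) : List (String × List String) :=
  let oldD := PySem.Dict.mk old_hashes
  let newD := PySem.Dict.mk new_hashes
  let old_keys := PySem.List.sorted oldD.keys (fun x => x) false
  let new_keys := PySem.List.sorted newD.keys (fun x => x) false
  let q := bMerge (bPred oldD newD) old_keys new_keys [] [] [] []
  [("added", q.1), ("removed", q.2.1), ("changed", q.2.2.1), ("unchanged", q.2.2.2)]

-- ===== PRECONDITION & SPEC =====
-- Pre_ excludes association lists with duplicate keys: a Python dict can never hold them,
-- so such inputs do not represent any input A actually receives.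
def Pre_diff_files (old_hashes : List (String × List (String × String))) (new_hashes : List (String × String)) : Prop :=
  (old_hashes.map Prod.fst).Nodup ∧ (new_hashes.map Prod.fst).Nodup
instance (old_hashes : List (String × List (String × String))) (new_hashes : List (String × String)) : Decidable (Pre_diff_files old_hashes new_hashes) := by unfold Pre_diff_files; infer_instance
def pvWitness_diff_files : (List (String × List (String × String))) × (List (String × String)) :=
  ([("a", [("hash", "h1")]), ("c", [])], [("a", "h1"), ("b", "x")])
def Spec_diff_files (old_hashes : List (String × List (String × String))) (new_hashes : List (String × String)) (out : List (String × List String)) : Prop := out = diff_files_alt old_hashes new_hashes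
instance (old_hashes : List (String × List (String × String))) (new_hashes : List (String × String)) (out : List (String × List String)) : Decidable (Spec_diff_files old_hashes new_hashes out) := by unfold Spec_diff_files; infer_instance

-- ===== CLAIM (what is proved, stated in full; the proofs are below) =====
def Claim_equal_diff_files : Prop := ∀ (old_hashes : List (String × List (String × String))) (new_hashes : List (String × String)), Dom_diff_files old_hashes new_hashes → Pre_diff_files old_hashes new_hashes → Spec_diff_files old_hashes new_hashes (diff_files old_hashes new_hashes)

-- ===== LEMMAS AND PROOFS =====

theorem contains_cons_of_ne (o y : String) (l : List String) (h : y ≠ o) :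
    (o :: l).contains y = l.contains y := by
  simp [h]

theorem contains_eq_false_of_forall_lt (x : String) (l : List String) (h : ∀ y ∈ l, x < y) :
    l.contains x = false := by
  rw [Bool.eq_false_iff]
  intro hc
  exact absurd (h x (by simpa using hc)) (lt_irrefl x)

theorem contains_eq_of_perm (l l' : List String) (h : l.Perm l') (x : String) :
    l.contains x = l'.contains x := by
  rw [Bool.eq_iff_iff]
  simp [h.mem_iff]

-- the merge, characterised: on strictly sorted inputs the four buckets are membership filters
theorem merge_spec_aux (pred : String → Bool) : ∀ (N : Nat) (ok nk a r c u : List String),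
    ok.length + nk.length ≤ N → ok.Pairwise (· < ·) → nk.Pairwise (· < ·) →
    bMerge pred ok nk a r c u =
      (a ++ nk.filter (fun x => !(ok.contains x)),
       r ++ ok.filter (fun x => !(nk.contains x)),
       c ++ nk.filter (fun x => ok.contains x && pred x),
       u ++ nk.filter (fun x => ok.contains x && !pred x)) := by
  intro N
  induction N with
  | zero =>
    intro ok nk a r c u hlen hok hnk
    cases ok with
    | nil =>
      cases nk with
      | nil => simp [bMerge]
      | cons n nt => simp at hlen
    | cons o ot => simp at hlen
  | succ N ih =>
    intro ok nk a r c u hlen hok hnk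
    cases ok with
    | nil => simp [bMerge]
    | cons o ot =>
      cases nk with
      | nil => simp [bMerge]
      | cons n nt =>
        obtain ⟨hokh, hokt⟩ := List.pairwise_cons.mp hok
        obtain ⟨hnkh, hnkt⟩ := List.pairwise_cons.mp hnk
        rw [bMerge]
        by_cases h1 : o = n
        · subst h1
          have fA : (o :: nt).filter (fun x => !((o :: ot).contains x)) =
              nt.filter (fun x => !(ot.contains x)) := by
            rw [List.filter_cons]
            simp only [List.contains_cons, BEq.rfl, Bool.true_or, Bool.not_true,
              Bool.false_eq_true, if_false]
            exact List.filter_congr (fun x hx => by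
              simp [ne_of_gt (hnkh x hx)])
          have fR : (o :: ot).filter (fun x => !((o :: nt).contains x)) =
              ot.filter (fun x => !(nt.contains x)) := by
            rw [List.filter_cons]
            simp only [List.contains_cons, BEq.rfl, Bool.true_or, Bool.not_true,
              Bool.false_eq_true, if_false]
            exact List.filter_congr (fun x hx => by
              simp [ne_of_gt (hokh x hx)])
          have fCt : nt.filter (fun x => (x == o || ot.contains x) && pred x) =
              nt.filter (fun x => ot.contains x && pred x) :=
            List.filter_congr (fun x hx => by
              have hne : (x == o) = false := by simpa using ne_of_gt (hnkh x hx)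
              simp [hne])
          have fUt : nt.filter (fun x => (x == o || ot.contains x) && !pred x) =
              nt.filter (fun x => ot.contains x && !pred x) :=
            List.filter_congr (fun x hx => by
              have hne : (x == o) = false := by simpa using ne_of_gt (hnkh x hx)
              simp [hne])
          rw [if_pos rfl]
          by_cases hp : pred o
          · rw [if_pos hp,
              ih ot nt a r (c ++ [o]) u (by simp at hlen ⊢; omega) hokt hnkt]
            simp only [Prod.mk.injEq, fA, fR, true_and]
            refine ⟨?_, ?_⟩
            · rw [List.filter_cons]
              simp only [List.contains_cons, BEq.rfl, Bool.true_or, hp,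
                Bool.and_true, if_true, fCt, List.append_assoc, List.singleton_append]
            · rw [List.filter_cons]
              simp only [List.contains_cons, BEq.rfl, Bool.true_or, hp,
                Bool.not_true, Bool.and_false, Bool.false_eq_true, if_false, fUt]
          · rw [if_neg hp,
              ih ot nt a r c (u ++ [o]) (by simp at hlen ⊢; omega) hokt hnkt]
            simp only [Prod.mk.injEq, fA, fR, true_and]
            refine ⟨?_, ?_⟩
            · rw [List.filter_cons]
              simp only [List.contains_cons, BEq.rfl, Bool.true_or,
                Bool.true_and, hp, Bool.false_eq_true, if_false, fCt]
            · rw [List.filter_cons]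
              simp only [List.contains_cons, BEq.rfl, Bool.true_or, hp,
                Bool.true_and, Bool.not_false, if_true, fUt,
                List.append_assoc, List.singleton_append]
        · rw [if_neg h1]
          by_cases h2 : o < n
          · -- o only in old: removed
            have hlt : ∀ x ∈ n :: nt, o < x := by
              intro x hx
              rcases List.mem_cons.mp hx with h | h
              · exact h ▸ h2
              · exact lt_trans h2 (hnkh x h)
            have fA : (n :: nt).filter (fun x => !((o :: ot).contains x)) =
                (n :: nt).filter (fun x => !(ot.contains x)) :=
              List.filter_congr (fun x hx => by
                rw [contains_cons_of_ne _ _ _ (ne_of_gt (hlt x hx))])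
            have fC : (n :: nt).filter (fun x => (o :: ot).contains x && pred x) =
                (n :: nt).filter (fun x => ot.contains x && pred x) :=
              List.filter_congr (fun x hx => by
                rw [contains_cons_of_ne _ _ _ (ne_of_gt (hlt x hx))])
            have fU : (n :: nt).filter (fun x => (o :: ot).contains x && !pred x) =
                (n :: nt).filter (fun x => ot.contains x && !pred x) :=
              List.filter_congr (fun x hx => by
                rw [contains_cons_of_ne _ _ _ (ne_of_gt (hlt x hx))])
            rw [if_pos h2,
              ih ot (n :: nt) a (r ++ [o]) c u (by simp at hlen ⊢; omega) hokt hnk]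
            simp only [Prod.mk.injEq, fA, fC, fU, true_and, and_true]
            rw [List.filter_cons,
              contains_eq_false_of_forall_lt o (n :: nt) hlt]
            simp [List.append_assoc]
          · -- n only in new: added
            have h3 : n < o := lt_of_le_of_ne (not_lt.mp h2) (Ne.symm h1)
            have hlt : ∀ x ∈ o :: ot, n < x := by
              intro x hx
              rcases List.mem_cons.mp hx with h | h
              · exact h ▸ h3
              · exact lt_trans h3 (hokh x h)
            have fR : (o :: ot).filter (fun x => !((n :: nt).contains x)) =
                (o :: ot).filter (fun x => !(nt.contains x)) :=
              List.filter_congr (fun x hx => by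
                rw [contains_cons_of_ne _ _ _ (ne_of_gt (hlt x hx))])
            have hcn : (o :: ot).contains n = false :=
              contains_eq_false_of_forall_lt n (o :: ot) hlt
            rw [if_neg h2,
              ih (o :: ot) nt (a ++ [n]) r c u (by simp at hlen ⊢; omega) hok hnkt]
            simp only [Prod.mk.injEq, fR, true_and]
            refine ⟨?_, ?_, ?_⟩
            · rw [List.filter_cons, hcn]
              simp [List.append_assoc]
            · rw [List.filter_cons, hcn]
              simp
            · rw [List.filter_cons, hcn]
              simp

theorem merge_spec (pred : String → Bool) (ok nk a r c u : List String)
    (hok : ok.Pairwise (· < ·)) (hnk : nk.Pairwise (· < ·)) :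
    bMerge pred ok nk a r c u =
      (a ++ nk.filter (fun x => !(ok.contains x)),
       r ++ ok.filter (fun x => !(nk.contains x)),
       c ++ nk.filter (fun x => ok.contains x && pred x),
       u ++ nk.filter (fun x => ok.contains x && !pred x)) :=
  merge_spec_aux pred (ok.length + nk.length) ok nk a r c u le_rfl hok hnk

theorem sorted_id_pairwise_lt (xs : List String) (h : xs.Nodup) :
    (PySem.List.sorted xs (fun x => x) false).Pairwise (· < ·) := by
  have hle := PySem.List.sorted_pairwise (xs := xs) (key := fun x => x)
  have hnd : (PySem.List.sorted xs (fun x => x) false).Nodup :=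
    (PySem.List.sorted_perm (xs := xs) (key := fun x => x) (rev := false)).nodup_iff.mpr h
  exact (hle.and hnd).imp (fun h => lt_of_le_of_ne h.1 h.2)

-- filtering a list by "not in (its own filtered sublist)" = filtering by the negated predicate
theorem filter_not_contains_filter (l : List String) (p : String → Bool) :
    List.filter (fun x => !((List.filter p l).contains x)) l
    = List.filter (fun x => !p x) l := by
  apply List.filter_congr
  intro x hx
  by_cases hp : p x = true
  · simp [List.mem_filter, hx, hp]
  · simp only [Bool.not_eq_true] at hp
    simp [List.mem_filter, hp]

-- A's sorted(set-expression) equals B's corresponding merge bucket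
theorem sorted_eq_of_perm_strict (xs ys : List String)
    (hp : ys.Perm xs) (hs : ys.Pairwise (· < ·)) :
    PySem.List.sorted xs (fun x => x) false = ys :=
  PySem.List.sorted_eq_of_perm_of_pairwise_lt xs ys (fun x => x) hp hs

-- ===== VERDICT (by name: the statement is the Claim_ definition above) =====
theorem diff_files_spec : Claim_equal_diff_files := by
  intro old_hashes new_hashes _ hpre
  obtain ⟨hold, hnew⟩ := hpre
  have hOn : (List.map (fun (x : String × List (String × String)) => x.1) old_hashes).Nodup := by
    simpa using hold
  have hNn : (List.map (fun (x : String × String) => x.1) new_hashes).Nodup := by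
    simpa using hnew
  unfold Spec_diff_files diff_files diff_files_alt
  simp only [PySem.Dict.keys]
  rw [PySem.Set.ofList_eq_self_of_nodup (xs := List.map (fun (x : String × List (String × String)) => x.1) old_hashes) hOn,
      PySem.Set.ofList_eq_self_of_nodup (xs := List.map (fun (x : String × String) => x.1) new_hashes) hNn]
  have hOlt := sorted_id_pairwise_lt _ hOn
  have hNlt := sorted_id_pairwise_lt _ hNn
  rw [merge_spec _ _ _ _ _ _ _ hOlt hNlt]
  simp only [List.nil_append, bPred]
  set oldK := List.map (fun (x : String × List (String × String)) => x.1) old_hashes with hoK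
  set newK := List.map (fun (x : String × String) => x.1) new_hashes with hnK
  set P : String → Bool := fun f =>
    (((PySem.Dict.mk new_hashes).get? f).getD "" !=
      PySem.Dict.getD (PySem.Dict.mk (((PySem.Dict.mk old_hashes).get? f).getD [])) "hash" "") with hPdef
  set oldS := PySem.List.sorted oldK (fun x => x) false with hoS
  set newS := PySem.List.sorted newK (fun x => x) false with hnS
  have hOperm : oldS.Perm oldK := PySem.List.sorted_perm oldK (fun x => x) false
  have hNperm : newS.Perm newK := PySem.List.sorted_perm newK (fun x => x) false
  have hcO : ∀ x, oldS.contains x = oldK.contains x := contains_eq_of_perm _ _ hOperm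
  have hcN : ∀ x, newS.contains x = newK.contains x := contains_eq_of_perm _ _ hNperm
  have hdiffNO : PySem.Set.diff newK oldK = newK.filter (fun x => !(oldK.contains x)) := by
    simp [PySem.Set.diff]
  have hdiffON : PySem.Set.diff oldK newK = oldK.filter (fun x => !(newK.contains x)) := by
    simp [PySem.Set.diff]
  have hinter : PySem.Set.inter newK oldK = newK.filter (fun x => oldK.contains x) := by
    simp [PySem.Set.inter]
  have hA : PySem.List.sorted (PySem.Set.diff newK oldK) (fun x => x) false
      = newS.filter (fun x => !(oldS.contains x)) := by
    apply sorted_eq_of_perm_strict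
    · rw [hdiffNO,
        List.filter_congr (fun x _ => by rw [hcO x] :
          ∀ x ∈ newS, (!(oldS.contains x)) = !(oldK.contains x))]
      exact List.Perm.filter _ hNperm
    · exact List.Pairwise.sublist List.filter_sublist hNlt
  have hR : PySem.List.sorted (PySem.Set.diff oldK newK) (fun x => x) false
      = oldS.filter (fun x => !(newS.contains x)) := by
    apply sorted_eq_of_perm_strict
    · rw [hdiffON,
        List.filter_congr (fun x _ => by rw [hcN x] :
          ∀ x ∈ oldS, (!(newS.contains x)) = !(newK.contains x))]
      exact List.Perm.filter _ hOperm
    · exact List.Pairwise.sublist List.filter_sublist hOlt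
  have hnodC : ((PySem.Set.inter newK oldK).filter P).Nodup :=
    (PySem.Set.nodup_inter _ _ hNn).filter _
  have hC : PySem.List.sorted (PySem.Set.ofList ((PySem.Set.inter newK oldK).filter P)) (fun x => x) false
      = newS.filter (fun x => oldS.contains x && P x) := by
    rw [PySem.Set.ofList_eq_self_of_nodup (xs := (PySem.Set.inter newK oldK).filter P) hnodC]
    apply sorted_eq_of_perm_strict
    · rw [hinter, List.filter_filter,
        List.filter_congr (fun x _ => by rw [hcO x, Bool.and_comm] :
          ∀ x ∈ newS, (oldS.contains x && P x) = (P x && oldK.contains x))]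
      exact List.Perm.filter _ hNperm
    · exact List.Pairwise.sublist List.filter_sublist hNlt
  have hU : PySem.List.sorted (PySem.Set.diff (PySem.Set.inter newK oldK)
        (PySem.Set.ofList ((PySem.Set.inter newK oldK).filter P))) (fun x => x) false
      = newS.filter (fun x => oldS.contains x && !(P x)) := by
    rw [PySem.Set.ofList_eq_self_of_nodup (xs := (PySem.Set.inter newK oldK).filter P) hnodC]
    have hd : PySem.Set.diff (PySem.Set.inter newK oldK) ((PySem.Set.inter newK oldK).filter P)
        = (PySem.Set.inter newK oldK).filter (fun x => !(P x)) := by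
      have h1 : PySem.Set.diff (PySem.Set.inter newK oldK) ((PySem.Set.inter newK oldK).filter P)
          = (PySem.Set.inter newK oldK).filter
              (fun x => !(((PySem.Set.inter newK oldK).filter P).contains x)) := by
        simp [PySem.Set.diff]
      rw [h1, filter_not_contains_filter]
    rw [hd]
    apply sorted_eq_of_perm_strict
    · rw [hinter, List.filter_filter,
        List.filter_congr (fun x _ => by rw [hcO x, Bool.and_comm] :
          ∀ x ∈ newS, (oldS.contains x && !(P x)) = (!(P x) && oldK.contains x))]
      exact List.Perm.filter _ hNperm
    · exact List.Pairwise.sublist List.filter_sublist hNlt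
  rw [hA, hR, hC, hU]
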